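-- pv_equiv track=rewrite | github.com/UR-MJ/UR_IV | utils/prompt_cleaner.py | _escape_inner_parens
-- ===== SOURCE A (Python) =====
-- def _escape_inner_parens(text: str) -> str:
--     """안쪽 내용의 모든 괄호를 이스케이프 (이미 이스케이프된 건 건너뛰기)"""
--     result = []
--     i = 0
--     while i < len(text):
--         if text[i] == '\\' and i + 1 < len(text) and text[i + 1] in '()':
--             result.append(text[i:i + 2])
--             i += 2
--         elif text[i] == '(':
--             result.append(r'\(')
--             i += 1
--         elif text[i] == ')':
--             result.append(r'\)')
--             i += 1
--         else:
--             result.append(text[i])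
--             i += 1
--     return ''.join(result)
-- ===== SOURCE B (Python) =====
-- import re
--
-- def _escape_inner_parens(text: str) -> str:
--     """Escape bare parens; leave already-escaped ones alone (single regex pass)."""
--     def repl(m):
--         s = m.group(0)
--         return s if s.startswith('\\') else '\\' + s
--     return re.sub(r'\\[()]|[()]', repl, text)
-- ===== Notes on version B (the rewrite author's own statement) =====
-- stated objective: idiomatic
-- what changed: Replaces the manual index loop with per-chunk list appends by a single re.sub pass whose alternation consumes already-escaped parens as units and escapes bare parens.
import Mathlib
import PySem

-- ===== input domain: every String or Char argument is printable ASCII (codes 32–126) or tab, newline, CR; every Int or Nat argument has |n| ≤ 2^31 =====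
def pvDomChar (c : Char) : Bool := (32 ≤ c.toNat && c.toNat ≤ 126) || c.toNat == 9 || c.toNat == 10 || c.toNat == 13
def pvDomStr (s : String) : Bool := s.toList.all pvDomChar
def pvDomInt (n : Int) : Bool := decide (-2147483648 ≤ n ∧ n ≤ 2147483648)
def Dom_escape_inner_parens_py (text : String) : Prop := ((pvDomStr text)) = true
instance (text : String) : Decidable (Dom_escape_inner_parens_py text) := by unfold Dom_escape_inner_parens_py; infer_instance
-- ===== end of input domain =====

-- B replaces the manual index loop with a single regex-substitution pass (re.sub with alternation \\[()]|[()]); idiomatic, same O(n) cost.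


-- ===== PORT A =====
-- Port of A: index loop over the string, appending chunks (strings) joined at the end.
def pvEscA (cs : List Char) (i : Nat) (result : List (List Char)) : List (List Char) :=
  if h : i < cs.length then
    if cs[i] = '\\' ∧ ∃ h2 : i + 1 < cs.length, (cs[i+1] = '(' ∨ cs[i+1] = ')') then
      pvEscA cs (i + 2) (result ++ [((cs.drop i).take 2)])
    else if cs[i] = '(' then
      pvEscA cs (i + 1) (result ++ [['\\', '(']])
    else if cs[i] = ')' then
      pvEscA cs (i + 1) (result ++ [['\\', ')']])
    else
      pvEscA cs (i + 1) (result ++ [[cs[i]]])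
  else result
termination_by cs.length - i

def escape_inner_parens_py (text : String) : String :=
  String.mk (pvEscA text.toList 0 []).flatten

-- ===== PORT B =====
-- Port of B: the regex scan r'\\[()]|[()]': at each position try the escaped-pair
-- alternative first, then a bare paren, else copy the character (leftmost scan of re.sub).
def pvEscB : List Char → List Char
  | '\\' :: d :: rest =>
    if d = '(' ∨ d = ')' then '\\' :: d :: pvEscB rest
    else '\\' :: pvEscB (d :: rest)
  | c :: rest =>
    if c = '(' ∨ c = ')' then '\\' :: c :: pvEscB rest
    else c :: pvEscB rest
  | [] => []

def escape_inner_parens_py_alt (text : String) : String :=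
  String.mk (pvEscB text.toList)

-- ===== PRECONDITION & SPEC =====
def Spec_escape_inner_parens_py (text : String) (out : String) : Prop := out = escape_inner_parens_py_alt text
instance (text : String) (out : String) : Decidable (Spec_escape_inner_parens_py text out) := by unfold Spec_escape_inner_parens_py; infer_instance

-- ===== CLAIM (what is proved, stated in full; the proofs are below) =====
def Claim_equal_escape_inner_parens_py : Prop := ∀ (text : String), Dom_escape_inner_parens_py text → Spec_escape_inner_parens_py text (escape_inner_parens_py text)

-- ===== LEMMAS AND PROOFS =====
theorem pvEscB_nil : pvEscB [] = [] := by simp [pvEscB]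

theorem pvEscB_esc (d : Char) (l : List Char) (hp : d = '(' ∨ d = ')') :
    pvEscB ('\\' :: d :: l) = '\\' :: d :: pvEscB l := by
  simp [pvEscB, hp]

theorem pvEscB_esc_other (d : Char) (l : List Char) (hp : ¬(d = '(' ∨ d = ')')) :
    pvEscB ('\\' :: d :: l) = '\\' :: pvEscB (d :: l) := by
  simp [pvEscB, hp]

theorem pvEscB_bs_nil : pvEscB ['\\'] = ['\\'] := by
  rw [pvEscB.eq_def]; simp [pvEscB_nil]

theorem pvEscB_cons (c : Char) (l : List Char) (hb : c ≠ '\\') :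
    pvEscB (c :: l) = (if c = '(' ∨ c = ')' then ['\\', c] else [c]) ++ pvEscB l := by
  rcases l with _ | ⟨d, l⟩
  · rw [pvEscB.eq_def]
    split
    · rename_i heq
      simp at heq
    · rename_i heq
      injection heq with hc hr
      subst hc; subst hr
      split_ifs <;> simp [pvEscB]
    · rename_i heq
      simp at heq
  · rw [pvEscB.eq_def]
    split
    · rename_i heq
      injection heq with hc _
      exact absurd hc hb
    · rename_i heq
      injection heq with hc hr
      subst hc; subst hr
      split_ifs <;> simp
    · rename_i heq
      simp at heq

theorem pvEscA_flatten (n : Nat) : ∀ (cs : List Char) (i : Nat) (result : List (List Char)),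
    cs.length - i = n →
    (pvEscA cs i result).flatten = result.flatten ++ pvEscB (cs.drop i) := by
  induction n using Nat.strong_induction_on with
  | _ n ih =>
    intro cs i result hn
    rw [pvEscA]
    by_cases h : i < cs.length
    · simp only [h, dif_pos]
      have hdrop : cs.drop i = cs[i] :: cs.drop (i+1) := List.drop_eq_getElem_cons h
      split_ifs with h1 h2 h3
      · obtain ⟨hb, h2, hp⟩ := h1
        have hdrop2 : cs.drop (i+1) = cs[i+1] :: cs.drop (i+2) := List.drop_eq_getElem_cons h2
        rw [ih (cs.length - (i+2)) (by omega) cs (i+2) _ rfl, hdrop, hdrop2, hb,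
          pvEscB_esc _ _ hp]
        simp [List.take]
      · rw [ih (cs.length - (i+1)) (by omega) cs (i+1) _ rfl, hdrop, h2,
          pvEscB_cons _ _ (by decide)]
        simp
      · rw [ih (cs.length - (i+1)) (by omega) cs (i+1) _ rfl, hdrop, h3,
          pvEscB_cons _ _ (by decide)]
        simp
      · rw [ih (cs.length - (i+1)) (by omega) cs (i+1) _ rfl, hdrop]
        by_cases hb : cs[i] = '\\'
        · by_cases hlen : i + 1 < cs.length
          · have hdrop2 : cs.drop (i+1) = cs[i+1] :: cs.drop (i+2) := List.drop_eq_getElem_cons hlen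
            rw [hb, hdrop2, pvEscB_esc_other _ _ (fun hp => h1 ⟨hb, hlen, hp⟩), ← hdrop2]
            simp
          · have hdrop2 : cs.drop (i+1) = [] := List.drop_eq_nil_of_le (by omega)
            rw [hb, hdrop2, pvEscB_bs_nil]
            simp [pvEscB_nil]
        · rw [pvEscB_cons _ _ hb]
          simp [h2, h3]
    · simp only [h, dif_neg, not_false_iff]
      rw [List.drop_eq_nil_of_le (by omega)]
      simp [pvEscB_nil]

-- ===== VERDICT (by name: the statement is the Claim_ definition above) =====
theorem escape_inner_parens_py_spec : Claim_equal_escape_inner_parens_py := by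
  intro text _
  unfold Spec_escape_inner_parens_py escape_inner_parens_py escape_inner_parens_py_alt
  rw [pvEscA_flatten (text.toList.length - 0) text.toList 0 [] rfl]
  simp
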